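-- pv_equiv track=rewrite | github.com/wellecks/naturalproofs | naturalproofs/encoder_decoder/analyze.py | _make_multiset
-- ===== SOURCE A (Python) =====
-- from collections import defaultdict
--
-- def _make_multiset(items):
--     multiset = set()
--     multiplicities = defaultdict(int)
--     for item in items:
--         id_ = multiplicities[item]
--         multiplicities[item] += 1
--         item_with_multiplicity = '%d_%d' % (item, id_)
--         multiset.add(item_with_multiplicity)
--     return multiset
-- ===== SOURCE B (Python) =====
-- def _make_multiset(items):
--     positions = {}
--     for i, x in enumerate(items):
--         positions.setdefault(x, []).append(i)
--     return {'%d_%d' % (x, positions[x].index(i)) for i, x in enumerate(items)}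
-- ===== Notes on version B (the rewrite author's own statement) =====
-- stated objective: alternative
-- what changed: Replaced A's single interleaved pass holding a running-count dict by a two-phase inverted-index design: first group every occurrence position into a per-value position list, then generate each tag by looking up the occurrence's rank (its index's position inside its value's list).
import Mathlib
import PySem

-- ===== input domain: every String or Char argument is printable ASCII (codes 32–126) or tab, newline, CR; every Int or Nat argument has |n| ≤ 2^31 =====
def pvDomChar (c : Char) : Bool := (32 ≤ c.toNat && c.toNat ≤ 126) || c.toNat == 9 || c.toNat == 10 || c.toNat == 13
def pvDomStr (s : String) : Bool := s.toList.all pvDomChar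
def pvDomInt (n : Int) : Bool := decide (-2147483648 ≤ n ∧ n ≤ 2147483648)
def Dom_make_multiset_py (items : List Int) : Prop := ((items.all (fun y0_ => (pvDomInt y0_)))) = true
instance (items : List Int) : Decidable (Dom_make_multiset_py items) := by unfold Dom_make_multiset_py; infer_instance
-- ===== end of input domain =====

-- B replaces A's single pass with a running-count dict by a two-phase inverted index
-- (group occurrence positions per value, then tag each occurrence with its rank in its
-- value's position list); alternative decomposition, not faster.
-- '%d_%d' % (a, b)
def pvFmt (a b : Int) : String := PySem.Int.toStr a ++ "_" ++ PySem.Int.toStr b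

-- ===== PORT A =====
def make_multiset_py (items : List Int) : List String :=
  (items.foldl
    (fun (st : PySem.Set String × PySem.Dict Int Int) item =>
      let id_ := st.2.getD item 0
      let multiplicities := st.2.modify item 0 (· + 1)
      (PySem.Set.add st.1 (pvFmt item id_), multiplicities))
    (([] : PySem.Set String), (PySem.Dict.empty : PySem.Dict Int Int))).1

-- ===== PORT B =====
-- first loop of Source B: positions.setdefault(x, []).append(i)
def pvPositionsDict (items : List Int) : PySem.Dict Int (List Int) :=
  (PySem.List.enumerate items).foldl
    (fun d p => d.modify p.2 [] (fun l => l ++ [p.1])) PySem.Dict.empty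

def make_multiset_py_alt (items : List Int) : List String :=
  let positions := pvPositionsDict items
  PySem.Set.ofList ((PySem.List.enumerate items).map
    (fun p => pvFmt p.2 ((((PySem.List.index? (positions.getD p.2 []) p.1).getD 0 : Nat) : Int))))

-- ===== PRECONDITION & SPEC =====
def Spec_make_multiset_py (items : List Int) (out : List String) : Prop := out = make_multiset_py_alt items
instance (items : List Int) (out : List String) : Decidable (Spec_make_multiset_py items out) := by unfold Spec_make_multiset_py; infer_instance

-- ===== CLAIM (what is proved, stated in full; the proofs are below) =====
def Claim_equal_make_multiset_py : Prop := ∀ (items : List Int), Dom_make_multiset_py items → Spec_make_multiset_py items (make_multiset_py items)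

-- ===== LEMMAS AND PROOFS =====

-- the sequence of strings both programs feed to the set, processing `rest` after prefix `pref`
def pvStrs (pref rest : List Int) : List String :=
  match rest with
  | [] => []
  | x :: xs => pvFmt x ((pref.count x : Int)) :: pvStrs (pref ++ [x]) xs

theorem pvA_loop (rest : List Int) (s : PySem.Set String) (d : PySem.Dict Int Int)
    (pref : List Int) (hd : ∀ y, d.getD y 0 = (pref.count y : Int)) :
    (rest.foldl
      (fun (st : PySem.Set String × PySem.Dict Int Int) item =>
        let id_ := st.2.getD item 0
        let multiplicities := st.2.modify item 0 (· + 1)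
        (PySem.Set.add st.1 (pvFmt item id_), multiplicities))
      (s, d)).1
    = List.foldl PySem.Set.add s (pvStrs pref rest) := by
  induction rest generalizing s d pref with
  | nil => simp [pvStrs]
  | cons x xs ih =>
    simp only [List.foldl, pvStrs]
    rw [hd x]
    exact ih _ _ (pref ++ [x]) (by
      intro y
      rw [PySem.Dict.getD_modify]
      by_cases h : y = x
      · simp [h, hd, List.count_append]
      · simp [h, hd, List.count_append, Ne.symm h])

-- the per-value position list the inverted index stores
def pvPosList (items : List Int) (x : Int) : List Int :=
  ((PySem.List.enumerate items).filter (fun q => q.2 == x)).map (·.1)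

theorem pvPositions_getD (items : List Int) (x : Int) :
    (pvPositionsDict items).getD x [] = pvPosList items x := by
  unfold pvPositionsDict pvPosList
  have hswap : (PySem.List.enumerate items).foldl
        (fun d p => d.modify p.2 [] (fun l => l ++ [p.1])) PySem.Dict.empty
      = ((PySem.List.enumerate items).map (fun p => (p.2, p.1))).foldl
        (fun d q => d.modify q.1 [] (fun l => l ++ [q.2])) PySem.Dict.empty := by
    rw [List.foldl_map]
  rw [hswap]
  rw [PySem.Dict.getD_foldl_modify_append]
  simp [List.filter_map, Function.comp_def]

theorem pvPos_index (pref rest : List Int) (x : Int) (s : Int) :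
    PySem.List.index?
      (((PySem.List.enumerate (pref ++ x :: rest) s).filter (fun q => q.2 == x)).map (·.1))
      (s + (pref.length : Int)) = some (pref.count x) := by
  induction pref generalizing s with
  | nil =>
    rw [List.nil_append, PySem.List.enumerate_cons]
    simp only [List.filter_cons, BEq.rfl, if_pos, List.map_cons, List.length_nil,
      Int.natCast_zero, Int.add_zero, List.count_nil]
    exact PySem.List.index?_cons_self _ _
  | cons y pref' ih =>
    rw [List.cons_append, PySem.List.enumerate_cons]
    have hidx : s + ((y :: pref').length : Int) = (s + 1) + (pref'.length : Int) := by
      simp; ring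
    by_cases h : y = x
    · subst h
      simp only [List.filter_cons, BEq.rfl, if_pos, List.map_cons]
      rw [hidx]
      have hne : (s : Int) ≠ s + 1 + (pref'.length : Int) := by omega
      rw [PySem.List.index?_cons_of_ne _ hne]
      rw [ih (s + 1)]
      simp
    · have hb : ((s, y).2 == x) = false := by simpa using h
      simp only [List.filter_cons, hb, if_neg, Bool.false_eq_true, not_false_iff]
      rw [hidx, ih (s + 1)]
      simp [h]

theorem pvB_strs (items : List Int) (rest pref : List Int) (h : items = pref ++ rest) :
    (PySem.List.enumerate rest (pref.length : Int)).map
      (fun p => pvFmt p.2 ((((PySem.List.index? (pvPosList items p.2) p.1).getD 0 : Nat) : Int)))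
    = pvStrs pref rest := by
  induction rest generalizing pref with
  | nil => simp [pvStrs]
  | cons x xs ih =>
    rw [PySem.List.enumerate_cons]
    simp only [List.map, pvStrs]
    have hpos : PySem.List.index? (pvPosList items x) ((pref.length : Int))
        = some (pref.count x) := by
      have := pvPos_index pref xs x 0
      rw [h]
      unfold pvPosList
      simpa using this
    rw [hpos]
    have h2 : ((pref.length : Int) + 1) = (((pref ++ [x]).length : Nat) : Int) := by simp
    rw [h2, ih (pref ++ [x]) (by simp [h])]
    simp

theorem make_multiset_py_spec : Claim_equal_make_multiset_py := by
  intro items _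
  unfold Spec_make_multiset_py make_multiset_py make_multiset_py_alt
  rw [PySem.Set.ofList_eq_foldl]
  rw [pvA_loop items [] PySem.Dict.empty [] (by simp)]
  simp only [pvPositions_getD]
  have : PySem.List.enumerate items = PySem.List.enumerate items ((List.length ([] : List Int) : Int)) := by simp
  rw [this, pvB_strs items items [] (by simp)]
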